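-- pv_equiv track=rewrite | github.com/aaggarwal2805/PythonApps | Data_visualization/src/parse.py | fetch_incident_by_category_and_resolution
-- ===== SOURCE A (Python) =====
-- def fetch_incident_by_category_and_resolution(parsed_data):
--     """
--     Parse and return count of total incidents and unresolved incidents by category
--     """
--     incident_counter = dict()
--
--     for incident in parsed_data:
--         category = incident['Category']
--         resolution = incident['Resolution']
--         if category in incident_counter:
--             incident_counter[category][0] += 1
--             if resolution == "NONE":
--                 incident_counter[category][1] += 1
--         else:
--             if resolution == "NONE":
--                 incident_counter[category] = [1, 1]
--             else:
--                 incident_counter[category] = [1, 0]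
--
--     return incident_counter
-- ===== SOURCE B (Python) =====
-- def fetch_incident_by_category_and_resolution(parsed_data):
--     """
--     Parse and return count of total incidents and unresolved incidents by category
--     """
--     total = {}
--     for incident in parsed_data:
--         category = incident['Category']
--         total[category] = total.get(category, 0) + 1
--
--     unresolved = {}
--     for incident in parsed_data:
--         if incident['Resolution'] == "NONE":
--             category = incident['Category']
--             unresolved[category] = unresolved.get(category, 0) + 1
--
--     return {category: [count, unresolved.get(category, 0)]
--             for category, count in total.items()}
-- ===== Notes on version B (the rewrite author's own statement) =====
-- stated objective: alternative
-- what changed: Replaces the single conditional loop that mutates 2-element list values in place with two independent frequency-counting passes (total and unresolved-filtered) merged by a final dict comprehension over the total table's first-appearance key order.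
import Mathlib
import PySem

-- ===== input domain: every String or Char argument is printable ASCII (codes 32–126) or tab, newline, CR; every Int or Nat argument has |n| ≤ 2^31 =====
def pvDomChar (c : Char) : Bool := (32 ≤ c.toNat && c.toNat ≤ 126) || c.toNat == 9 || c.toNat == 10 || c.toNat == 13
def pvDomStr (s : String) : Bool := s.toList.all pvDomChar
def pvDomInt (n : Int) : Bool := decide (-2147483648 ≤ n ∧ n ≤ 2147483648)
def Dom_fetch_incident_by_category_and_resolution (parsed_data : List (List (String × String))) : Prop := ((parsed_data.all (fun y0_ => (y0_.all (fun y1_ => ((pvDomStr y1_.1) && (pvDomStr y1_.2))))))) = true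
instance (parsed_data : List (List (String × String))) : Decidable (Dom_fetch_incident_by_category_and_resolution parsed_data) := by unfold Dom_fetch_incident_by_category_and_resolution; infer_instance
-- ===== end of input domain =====

-- B replaces A's single conditional loop over in-place-mutated [total, unresolved] list values by
-- two independent frequency-counting passes merged afterwards (alternative decomposition, same cost).

-- ===== PORT A =====
-- incident['Category'] / incident['Resolution']: first-match association-list lookup; the ""
-- default is never read under Pre_ (both keys present), where Python would raise KeyError.
def pvKeyA (inc : List (String × String)) (k : String) : String :=
  (PySem.Dict.mk inc).getD k ""

-- one iteration of A's loop; list mutations old[0] += 1 / old[1] += 1 via pySetD/pyGetD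
def pvStepA (d : PySem.Dict String (List Int)) (inc : List (String × String)) :
    PySem.Dict String (List Int) :=
  let category := pvKeyA inc "Category"
  let resolution := pvKeyA inc "Resolution"
  if d.contains category then
    let old := d.getD category []
    let old0 := PySem.List.pySetD old 0 (PySem.List.pyGetD old 0 0 + 1)
    if resolution = "NONE" then
      d.insert category (PySem.List.pySetD old0 1 (PySem.List.pyGetD old0 1 0 + 1))
    else
      d.insert category old0
  else
    if resolution = "NONE" then d.insert category [1, 1]
    else d.insert category [1, 0]

def fetch_incident_by_category_and_resolution (parsed_data : List (List (String × String))) : List (String × List Int) :=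
  (parsed_data.foldl pvStepA PySem.Dict.empty).items

-- ===== PORT B =====
def pvKeyB (inc : List (String × String)) (k : String) : String :=
  (PySem.Dict.mk inc).getD k ""

def fetch_incident_by_category_and_resolution_alt (parsed_data : List (List (String × String))) : List (String × List Int) :=
  let total := parsed_data.foldl
    (fun d inc => d.insert (pvKeyB inc "Category") (d.getD (pvKeyB inc "Category") 0 + 1))
    PySem.Dict.empty
  let unresolved := parsed_data.foldl
    (fun d inc =>
      if pvKeyB inc "Resolution" = "NONE" then
        d.insert (pvKeyB inc "Category") (d.getD (pvKeyB inc "Category") 0 + 1)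
      else d)
    PySem.Dict.empty
  total.items.map (fun p => (p.1, [p.2, unresolved.getD p.1 0]))

-- ===== PRECONDITION & SPEC =====
-- Pre_ excludes exactly the incidents missing a 'Category' or 'Resolution' key, on which Python A raises KeyError.
def Pre_fetch_incident_by_category_and_resolution (parsed_data : List (List (String × String))) : Prop :=
  ∀ inc ∈ parsed_data, "Category" ∈ inc.map Prod.fst ∧ "Resolution" ∈ inc.map Prod.fst
instance (parsed_data : List (List (String × String))) : Decidable (Pre_fetch_incident_by_category_and_resolution parsed_data) := by unfold Pre_fetch_incident_by_category_and_resolution; infer_instance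

def pvWitness_fetch_incident_by_category_and_resolution : (List (List (String × String))) :=
  [[("Category", "net"), ("Resolution", "NONE")], [("Category", "net"), ("Resolution", "done")]]

def Spec_fetch_incident_by_category_and_resolution (parsed_data : List (List (String × String))) (out : List (String × List Int)) : Prop := out = fetch_incident_by_category_and_resolution_alt parsed_data
instance (parsed_data : List (List (String × String))) (out : List (String × List Int)) : Decidable (Spec_fetch_incident_by_category_and_resolution parsed_data out) := by unfold Spec_fetch_incident_by_category_and_resolution; infer_instance

-- ===== CLAIM (what is proved, stated in full; the proofs are below) =====
def Claim_equal_fetch_incident_by_category_and_resolution : Prop := ∀ (parsed_data : List (List (String × String))), Dom_fetch_incident_by_category_and_resolution parsed_data → Pre_fetch_incident_by_category_and_resolution parsed_data → Spec_fetch_incident_by_category_and_resolution parsed_data (fetch_incident_by_category_and_resolution parsed_data)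

-- ===== LEMMAS AND PROOFS =====
-- Both sides are shown equal to the canonical table: first-seen-order distinct categories, each
-- paired with its total count and its count among 'Resolution' == 'NONE' incidents.

def pvCat (inc : List (String × String)) : String := pvKeyA inc "Category"
def pvIsNone (inc : List (String × String)) : Bool := pvKeyA inc "Resolution" = "NONE"

-- the value pvStepA stores at key (pvCat inc), factored out of the four branches
def pvVal (d : PySem.Dict String (List Int)) (inc : List (String × String)) : List Int :=
  if d.contains (pvCat inc) then
    let old := d.getD (pvCat inc) []
    let old0 := PySem.List.pySetD old 0 (PySem.List.pyGetD old 0 0 + 1)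
    if pvKeyA inc "Resolution" = "NONE" then
      PySem.List.pySetD old0 1 (PySem.List.pyGetD old0 1 0 + 1)
    else old0
  else if pvKeyA inc "Resolution" = "NONE" then [1, 1] else [1, 0]

theorem pvStepA_insert (d : PySem.Dict String (List Int)) (inc : List (String × String)) :
    pvStepA d inc = d.insert (pvCat inc) (pvVal d inc) := by
  simp only [pvStepA, pvVal, pvCat]
  split_ifs <;> rfl

theorem pvKeysA (l : List (List (String × String))) :
    (l.foldl pvStepA PySem.Dict.empty).keys = PySem.Set.ofList (l.map pvCat) := by
  have h : pvStepA = fun d inc => d.insert (pvCat inc) (pvVal d inc) := by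
    funext d inc; exact pvStepA_insert d inc
  rw [h, PySem.Dict.keys_foldl_insert_key, PySem.Set.ofList_eq_foldl, List.foldl_map]
  simp [PySem.Set.update, List.foldl_map]

theorem pvNodupA (l : List (List (String × String))) :
    (l.foldl pvStepA PySem.Dict.empty).keys.Nodup := by
  have h : pvStepA = fun d inc => d.insert (pvCat inc) (pvVal d inc) := by
    funext d inc; exact pvStepA_insert d inc
  rw [h]
  exact PySem.Dict.nodup_keys_foldl_insert_key l pvCat pvVal _ (by simp [pysem])

theorem pvContainsA (l : List (List (String × String))) (c : String) :
    (l.foldl pvStepA PySem.Dict.empty).contains c = decide (c ∈ l.map pvCat) := by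
  rw [PySem.Dict.contains_eq_decide_mem_keys, pvKeysA]
  simp [PySem.Set.mem_ofList]

theorem pvSet0 (t u : Int) : PySem.List.pySetD [t,u] 0 (PySem.List.pyGetD [t,u] 0 0 + 1) = [t+1,u] := by
  simp [PySem.List.pySetD, PySem.List.pySet?, PySem.List.pyGetD, PySem.List.pyGet?, PySem.List.pyIdx?]

theorem pvSet1 (t u : Int) : PySem.List.pySetD [t,u] 1 (PySem.List.pyGetD [t,u] 1 0 + 1) = [t,u+1] := by
  simp [PySem.List.pySetD, PySem.List.pySet?, PySem.List.pyGetD, PySem.List.pyGet?, PySem.List.pyIdx?]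

theorem pvGetDA (l : List (List (String × String))) (c : String) :
    (l.foldl pvStepA PySem.Dict.empty).getD c [] =
      if c ∈ l.map pvCat then
        [((l.map pvCat).count c : Int), (((l.filter pvIsNone).map pvCat).count c : Int)]
      else [] := by
  induction l using List.reverseRecOn with
  | nil => simp [pysem]
  | append_singleton l x ih =>
    rw [List.foldl_append, List.foldl_cons, List.foldl_nil, pvStepA_insert,
      PySem.Dict.getD_insert]
    by_cases hc : c = pvCat x
    · subst hc
      rw [if_pos rfl, if_pos (by simp)]
      unfold pvVal
      rw [pvContainsA]
      by_cases hmem : pvCat x ∈ l.map pvCat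
      · rw [if_pos (by simpa using hmem)]
        rw [ih, if_pos hmem]
        simp only [pvSet0]
        by_cases hres : pvKeyA x "Resolution" = "NONE"
        · rw [if_pos hres, pvSet1]
          have hpx : pvIsNone x = true := by simp [pvIsNone, hres]
          simp [List.filter_append, hpx, List.count_append, pvCat]
        · rw [if_neg hres]
          have hpx : pvIsNone x = false := by simp [pvIsNone, hres]
          simp [List.filter_append, hpx, List.count_append, pvCat]
      · rw [if_neg (by simpa using hmem)]
        have hcnt : (l.map pvCat).count (pvCat x) = 0 := List.count_eq_zero.mpr hmem
        have hfm : pvCat x ∉ (l.filter pvIsNone).map pvCat := by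
          intro h
          rcases List.mem_map.mp h with ⟨a, ha, hae⟩
          exact hmem (List.mem_map.mpr ⟨a, List.mem_of_mem_filter ha, hae⟩)
        have hfcnt : ((l.filter pvIsNone).map pvCat).count (pvCat x) = 0 := List.count_eq_zero.mpr hfm
        by_cases hres : pvKeyA x "Resolution" = "NONE"
        · have hpx : pvIsNone x = true := by simp [pvIsNone, hres]
          simp [hres, List.filter_append, hpx, List.count_append, pvCat]
          exact ⟨hcnt, hfcnt⟩
        · have hpx : pvIsNone x = false := by simp [pvIsNone, hres]
          simp [hres, List.filter_append, hpx, List.count_append, pvCat]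
          exact ⟨hcnt, by exact_mod_cast hfcnt.symm⟩
    · rw [if_neg hc, ih]
      have h1 : c ∈ (l ++ [x]).map pvCat ↔ c ∈ l.map pvCat := by simp [hc]
      by_cases hmem : c ∈ l.map pvCat
      · rw [if_pos hmem, if_pos (h1.mpr hmem)]
        have hp : (l ++ [x]).filter pvIsNone = l.filter pvIsNone ++ (if pvIsNone x then [x] else []) := by
          simp [List.filter_append, List.filter_cons]
        have hne : pvKeyA x "Category" ≠ c := fun h => hc h.symm
        rw [hp]
        cases hpx : pvIsNone x <;>
          simp [List.count_append, hne, pvCat]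
      · rw [if_neg hmem, if_neg (fun h => hmem (h1.mp h))]

theorem pvItemsA (l : List (List (String × String))) :
    fetch_incident_by_category_and_resolution l =
      (PySem.Set.ofList (l.map pvCat)).map (fun c =>
        (c, [((l.map pvCat).count c : Int), (((l.filter pvIsNone).map pvCat).count c : Int)])) := by
  unfold fetch_incident_by_category_and_resolution
  rw [PySem.Dict.items_eq_map_keys _ (pvNodupA l) [], pvKeysA]
  apply List.map_congr_left
  intro c hc
  have hm : c ∈ List.map pvCat l := by simpa [PySem.Set.mem_ofList] using hc
  rw [pvGetDA, if_pos hm]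

theorem pvTotalGetD (l : List (List (String × String))) (d : PySem.Dict String Int) (c : String) :
    (l.foldl (fun d inc => d.insert (pvKeyB inc "Category") (d.getD (pvKeyB inc "Category") 0 + 1)) d).getD c 0
      = d.getD c 0 + ((l.map pvCat).count c : Int) := by
  induction l generalizing d with
  | nil => simp
  | cons x l ih =>
    rw [List.foldl_cons, ih, PySem.Dict.getD_insert]
    by_cases hc : c = pvKeyB x "Category"
    · rw [if_pos hc]
      have : pvCat x = c := hc.symm
      simp [this]
      rw [hc]; ring
    · rw [if_neg hc]
      have : ¬ pvCat x = c := fun h => hc h.symm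
      simp [this]

theorem pvUnresGetD (l : List (List (String × String))) (d : PySem.Dict String Int) (c : String) :
    (l.foldl (fun d inc =>
        if pvKeyB inc "Resolution" = "NONE" then
          d.insert (pvKeyB inc "Category") (d.getD (pvKeyB inc "Category") 0 + 1)
        else d) d).getD c 0
      = d.getD c 0 + (((l.filter pvIsNone).map pvCat).count c : Int) := by
  induction l generalizing d with
  | nil => simp
  | cons x l ih =>
    rw [List.foldl_cons]
    by_cases hres : pvKeyB x "Resolution" = "NONE"
    · have hpx : pvIsNone x = true := by simp [pvIsNone, pvKeyA]; exact hres
      rw [if_pos hres, ih, PySem.Dict.getD_insert]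
      by_cases hc : c = pvKeyB x "Category"
      · rw [if_pos hc]
        have : pvCat x = c := hc.symm
        simp [hpx, this]
        rw [hc]; ring
      · rw [if_neg hc]
        have : ¬ pvCat x = c := fun h => hc h.symm
        simp [hpx, this]
    · have hpx : pvIsNone x = false := by simp [pvIsNone, pvKeyA]; exact hres
      rw [if_neg hres, ih]
      simp [hpx]

theorem pvTotalKeys (l : List (List (String × String))) :
    (l.foldl (fun (d : PySem.Dict String Int) inc => d.insert (pvKeyB inc "Category") (d.getD (pvKeyB inc "Category") 0 + 1)) PySem.Dict.empty).keys
      = PySem.Set.ofList (l.map pvCat) := by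
  have h := PySem.Dict.keys_foldl_insert_key l pvCat
    (fun d i => d.getD (pvCat i) 0 + 1) (PySem.Dict.empty (κ := String) (ν := Int))
  show (l.foldl (fun d i => d.insert (pvCat i) ((fun (d : PySem.Dict String Int) i => d.getD (pvCat i) 0 + 1) d i)) PySem.Dict.empty).keys
      = PySem.Set.ofList (l.map pvCat)
  rw [h, PySem.Set.ofList_eq_foldl, List.foldl_map]
  simp [PySem.Set.update, List.foldl_map]

theorem pvTotalNodup (l : List (List (String × String))) :
    (l.foldl (fun (d : PySem.Dict String Int) inc => d.insert (pvKeyB inc "Category") (d.getD (pvKeyB inc "Category") 0 + 1)) PySem.Dict.empty).keys.Nodup := by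
  exact PySem.Dict.nodup_keys_foldl_insert_key l pvCat
    (fun d i => d.getD (pvCat i) 0 + 1) _ (by simp [pysem])

theorem pvAltEq (l : List (List (String × String))) :
    fetch_incident_by_category_and_resolution_alt l =
      (PySem.Set.ofList (l.map pvCat)).map (fun c =>
        (c, [((l.map pvCat).count c : Int), (((l.filter pvIsNone).map pvCat).count c : Int)])) := by
  unfold fetch_incident_by_category_and_resolution_alt
  show (List.map (fun p => (p.1, [p.2,
      (l.foldl (fun (d : PySem.Dict String Int) inc =>
        if pvKeyB inc "Resolution" = "NONE" then
          d.insert (pvKeyB inc "Category") (d.getD (pvKeyB inc "Category") 0 + 1)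
        else d) PySem.Dict.empty).getD p.1 0]))
    (l.foldl (fun (d : PySem.Dict String Int) inc => d.insert (pvKeyB inc "Category") (d.getD (pvKeyB inc "Category") 0 + 1)) PySem.Dict.empty).items)
    = _
  rw [PySem.Dict.items_eq_map_keys _ (pvTotalNodup l) 0, pvTotalKeys, List.map_map]
  apply List.map_congr_left
  intro c hc
  simp only [Function.comp_apply]
  rw [pvTotalGetD, pvUnresGetD]
  simp

-- ===== VERDICT (by name: the statement is the Claim_ definition above) =====
theorem fetch_incident_by_category_and_resolution_spec : Claim_equal_fetch_incident_by_category_and_resolution := by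
  intro l _ _
  unfold Spec_fetch_incident_by_category_and_resolution
  rw [pvItemsA, pvAltEq]
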